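-- pv_equiv track=rewrite | github.com/rokrokss/baekjoon | 12100/12100.py | move_line
-- ===== SOURCE A (Python) =====
-- def move_line(line, direction):
--     combined = False
--     nums = [x for x in line if x > 0]
--     if direction == 1:
--         line = [0 for _ in range(len(line) - len(nums))] + nums
--         for i in reversed(range(len(line))):
--             if i==0: break
--             if line[i] == 0: break
--             if line[i] == line[i-1]:
--                 line[i] *= 2
--                 line[:i] = [0] + line[:i-1]
--     else:
--         line = nums + [0 for _ in range(len(line) - len(nums))]
--         for i in range(len(line)-1):
--             if line[i] == 0: break
--             if line[i] == line[i+1]: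
--                 line[i] *= 2
--                 line[i+1:] = line[i+2:] + [0]
--     return line
-- ===== SOURCE B (Python) =====
-- def move_line(line, direction):
--     nums = [x for x in line if x > 0]
--     if direction == 1:
--         nums.reverse()
--     merged = []
--     i = 0
--     while i < len(nums):
--         if i + 1 < len(nums) and nums[i] == nums[i + 1]:
--             merged.append(nums[i] * 2)
--             i += 2
--         else:
--             merged.append(nums[i])
--             i += 1
--     merged += [0] * (len(line) - len(merged))
--     if direction == 1:
--         merged.reverse()
--     return merged
-- ===== Notes on version B (the rewrite author's own statement) =====
-- stated objective: faster
-- what changed: A repeatedly rewrites the whole line with slice assignments inside its merge loop (O(n^2)); B compacts the positives once, merges adjacent equal pairs in a single pass over the compacted list (handling the right move by reversing), and pads zeros (O(n)).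
import Mathlib
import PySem

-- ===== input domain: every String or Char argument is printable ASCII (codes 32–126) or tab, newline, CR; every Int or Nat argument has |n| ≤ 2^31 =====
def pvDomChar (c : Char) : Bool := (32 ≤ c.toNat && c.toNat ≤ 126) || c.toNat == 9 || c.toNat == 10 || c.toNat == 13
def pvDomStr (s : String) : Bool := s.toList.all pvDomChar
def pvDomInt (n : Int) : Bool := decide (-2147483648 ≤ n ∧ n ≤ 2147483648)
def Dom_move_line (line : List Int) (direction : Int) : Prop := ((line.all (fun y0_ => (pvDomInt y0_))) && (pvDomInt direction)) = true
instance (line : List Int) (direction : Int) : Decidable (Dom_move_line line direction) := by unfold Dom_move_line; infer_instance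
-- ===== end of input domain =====

-- B replaces A's per-merge whole-line slice rewrites by a single compact-merge-pad pass
-- (objective: faster); the return values are proved equal on every input.

-- ===== PORT A =====
-- 'for i in range(len(line)-1)' with breaks: the range bound stop = len(line)-1 is computed once
-- in Python and the loop body keeps the list length invariant, so stop is a constant parameter.
def moveLeftLoop (stop : Nat) (l : List Int) (i : Nat) : List Int :=
  if i < stop then
    let v := l.getD i 0
    if v = 0 then l
    else if v = l.getD (i+1) 0 then
      -- line[i] *= 2; line[i+1:] = line[i+2:] + [0]
      let l1 := l.set i (v * 2)
      moveLeftLoop stop (l1.take (i+1) ++ (l1.drop (i+2) ++ [0])) (i+1)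
    else moveLeftLoop stop l (i+1)
  else l
termination_by stop - i

-- 'for i in reversed(range(len(line)))' with 'if i==0: break'
def moveRightLoop (l : List Int) (i : Nat) : List Int :=
  if i = 0 then l
  else
    let v := l.getD i 0
    if v = 0 then l
    else if v = l.getD (i-1) 0 then
      -- line[i] *= 2; line[:i] = [0] + line[:i-1]
      let l1 := l.set i (v * 2)
      moveRightLoop ((0 : Int) :: l1.take (i-1) ++ l1.drop i) (i-1)
    else moveRightLoop l (i-1)
termination_by i

def move_line (line : List Int) (direction : Int) : List Int :=
  let nums := line.filter (fun x => 0 < x)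
  if direction = 1 then
    let line1 := List.replicate (line.length - nums.length) (0 : Int) ++ nums
    moveRightLoop line1 (line1.length - 1)
  else
    let line1 := nums ++ List.replicate (line.length - nums.length) (0 : Int)
    moveLeftLoop (line1.length - 1) line1 0

-- ===== PORT B =====
-- the while loop of Source B: index i over nums, merged built by appending
def mergeLoop (nums : List Int) (i : Nat) (acc : List Int) : List Int :=
  if i < nums.length then
    if i + 1 < nums.length ∧ nums.getD i 0 = nums.getD (i+1) 0 then
      mergeLoop nums (i+2) (acc ++ [nums.getD i 0 * 2])
    else
      mergeLoop nums (i+1) (acc ++ [nums.getD i 0])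
  else acc
termination_by nums.length - i

def move_line_alt (line : List Int) (direction : Int) : List Int :=
  let nums0 := line.filter (fun x => 0 < x)
  let nums := if direction = 1 then nums0.reverse else nums0
  let merged := mergeLoop nums 0 []
  let padded := merged ++ List.replicate (line.length - merged.length) (0 : Int)
  if direction = 1 then padded.reverse else padded

-- ===== PRECONDITION & SPEC =====
def Spec_move_line (line : List Int) (direction : Int) (out : List Int) : Prop := out = move_line_alt line direction
instance (line : List Int) (direction : Int) (out : List Int) : Decidable (Spec_move_line line direction out) := by unfold Spec_move_line; infer_instance

-- ===== CLAIM (what is proved, stated in full; the proofs are below) =====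
def Claim_equal_move_line : Prop := ∀ (line : List Int) (direction : Int), Dom_move_line line direction → Spec_move_line line direction (move_line line direction)

-- ===== LEMMAS AND PROOFS =====

-- functional one-pass merge: the mathematical form of Source B's while loop
def mergeL : List Int → List Int
  | [] => []
  | [x] => [x]
  | x :: y :: rest => if x = y then (x * 2) :: mergeL rest else x :: mergeL (y :: rest)

theorem mergeL_length_le : ∀ (p : List Int), (mergeL p).length ≤ p.length := by
  intro p
  induction p using mergeL.induct with
  | case1 => simp [mergeL]
  | case2 => simp [mergeL]
  | case3 y rest ih => simp [mergeL]; omega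
  | case4 x y rest h ih =>
      simp only [mergeL, if_neg h, List.length_cons]
      simp only [List.length_cons] at ih
      omega

theorem mergeLoop_eq_aux (nums : List Int) : ∀ (n i : Nat) (acc : List Int),
    nums.length - i ≤ n → mergeLoop nums i acc = acc ++ mergeL (nums.drop i) := by
  intro n
  induction n with
  | zero =>
    intro i acc h
    have h0 : ¬ i < nums.length := by omega
    rw [mergeLoop, if_neg h0]
    have hd : List.drop i nums = [] := List.drop_eq_nil_of_le (by omega)
    rw [hd]; simp [mergeL]
  | succ n ih =>
    intro i acc h
    rw [mergeLoop]
    by_cases h1 : i < nums.length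
    · rw [if_pos h1]
      by_cases h2 : i + 1 < nums.length ∧ nums.getD i 0 = nums.getD (i+1) 0
      · rw [if_pos h2, ih (i+2) _ (by omega)]
        obtain ⟨h3, h4⟩ := h2
        rw [List.drop_eq_getElem_cons h1, List.drop_eq_getElem_cons h3]
        rw [List.getD_eq_getElem _ _ h1, List.getD_eq_getElem _ _ h3] at h4
        rw [List.getD_eq_getElem _ _ h1]
        simp [mergeL, h4]
      · rw [if_neg h2, ih (i+1) _ (by omega)]
        rw [List.drop_eq_getElem_cons h1]
        by_cases h3 : i + 1 < nums.length
        · have h4 : nums.getD i 0 ≠ nums.getD (i+1) 0 := fun he => h2 ⟨h3, he⟩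
          rw [List.drop_eq_getElem_cons h3]
          rw [List.getD_eq_getElem _ _ h1, List.getD_eq_getElem _ _ h3] at h4
          rw [List.getD_eq_getElem _ _ h1]
          simp [mergeL, h4]
        · have hdrop : nums.drop (i+1) = [] := List.drop_eq_nil_of_le (by omega)
          rw [List.getD_eq_getElem _ _ h1]
          simp [hdrop, mergeL]
    · rw [if_neg h1]
      have hd : List.drop i nums = [] := List.drop_eq_nil_of_le (by omega)
      rw [hd]; simp [mergeL]

theorem mergeLoop_eq : ∀ (nums : List Int) (i : Nat) (acc : List Int),
    mergeLoop nums i acc = acc ++ mergeL (nums.drop i) := by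
  intro nums i acc
  exact mergeLoop_eq_aux nums (nums.length - i) i acc le_rfl

theorem getD_app (a t : List Int) (j : Nat) : (a ++ t).getD (a.length + j) 0 = t.getD j 0 := by
  rw [List.getD_append_right _ _ _ _ (by omega)]
  simp

theorem leftLoop_nil : ∀ (a : List Int) (k : Nat),
    moveLeftLoop (a.length + k - 1) (a ++ List.replicate k (0:Int)) a.length
      = a ++ List.replicate k (0:Int) := by
  intro a k
  rw [moveLeftLoop]
  by_cases h : a.length < a.length + k - 1
  · rw [if_pos h]
    have hv : (a ++ List.replicate k (0:Int)).getD a.length 0 = 0 := by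
      have h0 := getD_app a (List.replicate k (0:Int)) 0
      rw [Nat.add_zero] at h0
      rw [h0]
      cases k with | zero => rfl | succ k => simp
    simp only [hv]
    simp
  · rw [if_neg h]

theorem leftLoop_inv : ∀ (m : Nat) (p a : List Int) (k : Nat),
    p.length ≤ m → (∀ x ∈ p, 0 < x) →
    moveLeftLoop (a.length + p.length + k - 1) (a ++ (p ++ List.replicate k (0:Int))) a.length
      = a ++ (mergeL p ++ List.replicate (k + (p.length - (mergeL p).length)) (0:Int)) := by
  intro m
  induction m with
  | zero =>
    intro p a k hm _
    have hp : p = [] := List.eq_nil_of_length_eq_zero (by omega)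
    subst hp
    simpa [mergeL] using leftLoop_nil a k
  | succ m ih =>
    intro p a k hm hpos
    match p with
    | [] => simpa [mergeL] using leftLoop_nil a k
    | [x] =>
      have hx : (0:Int) < x := hpos x (by simp)
      rw [moveLeftLoop]
      by_cases h : a.length < a.length + [x].length + k - 1
      · rw [if_pos h]
        have hk : 1 ≤ k := by simp at h; omega
        have hv : (a ++ ([x] ++ List.replicate k (0:Int))).getD a.length 0 = x := by
          have h0 := getD_app a ([x] ++ List.replicate k (0:Int)) 0
          rw [Nat.add_zero] at h0
          rw [h0]; rfl
        have hv1 : (a ++ ([x] ++ List.replicate k (0:Int))).getD (a.length + 1) 0 = 0 := by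
          rw [getD_app a ([x] ++ List.replicate k (0:Int)) 1]
          cases k with | zero => omega | succ k => simp
        simp only [hv, hv1, if_neg (by omega : ¬ x = (0:Int))]
        have hres := leftLoop_nil (a ++ [x]) k
        simp only [List.length_append, List.length_cons, List.length_nil, List.append_assoc,
          List.singleton_append] at hres ⊢
        have hstop : a.length + (1 + k) - 1 = a.length + 1 + k - 1 := by omega
        rw [← hstop] at hres ⊢
        rw [hres]
        simp [mergeL]
      · rw [if_neg h]
        have hk : k = 0 := by simp at h; omega
        subst hk
        simp [mergeL]
    | x :: y :: rest =>
      have hx : (0:Int) < x := hpos x (by simp)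
      have hy : (0:Int) < y := hpos y (by simp)
      rw [moveLeftLoop]
      have h : a.length < a.length + (x :: y :: rest).length + k - 1 := by simp; omega
      rw [if_pos h]
      have hv : (a ++ ((x :: y :: rest) ++ List.replicate k (0:Int))).getD a.length 0 = x := by
        have h0 := getD_app a ((x :: y :: rest) ++ List.replicate k (0:Int)) 0
        rw [Nat.add_zero] at h0
        rw [h0]; rfl
      have hv1 : (a ++ ((x :: y :: rest) ++ List.replicate k (0:Int))).getD (a.length + 1) 0 = y := by
        rw [getD_app a ((x :: y :: rest) ++ List.replicate k (0:Int)) 1]; rfl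
      simp only [hv, hv1, if_neg (by omega : ¬ x = (0:Int))]
      by_cases hxy : x = y
      · rw [if_pos hxy]
        have hset : (a ++ ((x :: y :: rest) ++ List.replicate k (0:Int))).set a.length (x * 2)
            = a ++ ((x * 2 :: y :: rest) ++ List.replicate k (0:Int)) := by
          rw [List.set_append_right _ _ (le_refl a.length)]
          simp
        rw [hset]
        have htake : List.take (a.length + 1) (a ++ ((x * 2 :: y :: rest) ++ List.replicate k (0:Int)))
            = a ++ [x * 2] := by
          rw [List.take_append]
          simp [List.take_of_length_le]
        have hdrop : List.drop (a.length + 2) (a ++ ((x * 2 :: y :: rest) ++ List.replicate k (0:Int)))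
            = rest ++ List.replicate k (0:Int) := by
          rw [List.drop_append]
          simp [List.drop_of_length_le]
        rw [htake, hdrop]
        have hshape : (a ++ [x * 2]) ++ ((rest ++ List.replicate k (0:Int)) ++ [0])
            = (a ++ [x * 2]) ++ (rest ++ List.replicate (k + 1) (0:Int)) := by
          simp [List.replicate_succ']
        have hstop : a.length + (x :: y :: rest).length + k - 1
            = (a ++ [x * 2]).length + rest.length + (k + 1) - 1 := by
          simp; omega
        have hlen : a.length + 1 = (a ++ [x * 2]).length := by simp
        rw [hshape, hstop, hlen, ih rest (a ++ [x * 2]) (k + 1) (by simp at hm; omega)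
          (fun z hz => hpos z (by simp [hz]))]
        have hml := mergeL_length_le rest
        have hzr : (k + 1) + (rest.length - (mergeL rest).length)
            = k + ((x :: y :: rest).length - (mergeL (x :: y :: rest)).length) := by
          simp [mergeL, hxy]; omega
        rw [hzr]
        simp [mergeL, hxy]
      · rw [if_neg hxy]
        have hstop : a.length + (x :: y :: rest).length + k - 1
            = (a ++ [x]).length + (y :: rest).length + k - 1 := by
          simp; omega
        have hlen : a.length + 1 = (a ++ [x]).length := by simp
        have hshape : a ++ ((x :: y :: rest) ++ List.replicate k (0:Int))
            = (a ++ [x]) ++ ((y :: rest) ++ List.replicate k (0:Int)) := by simp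
        rw [hstop, hlen, hshape, ih (y :: rest) (a ++ [x]) k (by simp at hm ⊢; omega)
          (fun z hz => hpos z (by simp at hz ⊢; tauto))]
        have hml := mergeL_length_le (y :: rest)
        have hzr : k + ((y :: rest).length - (mergeL (y :: rest)).length)
            = k + ((x :: y :: rest).length - (mergeL (x :: y :: rest)).length) := by
          simp only [mergeL, if_neg hxy, List.length_cons]
          simp only [List.length_cons] at hml
          omega
        rw [hzr]
        simp [mergeL, hxy]

theorem rightLoop_nil : ∀ (a : List Int) (k : Nat),
    moveRightLoop (List.replicate k (0:Int) ++ a) (k - 1)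
      = List.replicate k (0:Int) ++ a := by
  intro a k
  rw [moveRightLoop]
  by_cases h : k - 1 = 0
  · rw [if_pos h]
  · rw [if_neg h]
    have hk : 2 ≤ k := by omega
    have hv : (List.replicate k (0:Int) ++ a).getD (k - 1) 0 = 0 := by
      rw [List.getD_append _ _ _ _ (by simp; omega)]
      simp
    simp only [hv]
    simp

theorem rightLoop_inv : ∀ (m : Nat) (r a : List Int) (k : Nat),
    r.length ≤ m → (∀ x ∈ r, 0 < x) →
    moveRightLoop ((List.replicate k (0:Int) ++ r.reverse) ++ a) (k + r.length - 1)
      = (List.replicate (k + (r.length - (mergeL r).length)) (0:Int) ++ (mergeL r).reverse) ++ a := by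
  intro m
  induction m with
  | zero =>
    intro r a k hm _
    have hr : r = [] := List.eq_nil_of_length_eq_zero (by omega)
    subst hr
    simpa [mergeL] using rightLoop_nil a k
  | succ m ih =>
    intro r a k hm hpos
    match r with
    | [] => simpa [mergeL] using rightLoop_nil a k
    | [x] =>
      have hx : (0:Int) < x := hpos x (by simp)
      by_cases hk : k = 0
      · subst hk
        rw [moveRightLoop]
        simp [mergeL]
      · rw [moveRightLoop]
        have hi : k + [x].length - 1 = k := by simp
        rw [hi, if_neg hk]
        have hassoc : (List.replicate k (0:Int) ++ [x].reverse) ++ a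
            = List.replicate k (0:Int) ++ ([x] ++ a) := by simp
        have hv : ((List.replicate k (0:Int) ++ [x].reverse) ++ a).getD k 0 = x := by
          rw [hassoc]
          have h0 := getD_app (List.replicate k (0:Int)) ([x] ++ a) 0
          simp only [List.length_replicate, Nat.add_zero] at h0
          rw [h0]; rfl
        have hv1 : ((List.replicate k (0:Int) ++ [x].reverse) ++ a).getD (k - 1) 0 = 0 := by
          rw [hassoc, List.getD_append _ _ _ _ (by simp; omega)]
          simp
        rw [hv, hv1]
        rw [if_neg (by omega : ¬ x = (0:Int)), if_neg (by omega : ¬ x = (0:Int))]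
        have hres := rightLoop_nil ([x] ++ a) k
        rw [← hassoc] at hres
        rw [hres, hassoc]
        simp [mergeL]
    | x :: y :: rest =>
      have hx : (0:Int) < x := hpos x (by simp)
      have hy : (0:Int) < y := hpos y (by simp)
      rw [moveRightLoop]
      have hi : k + (x :: y :: rest).length - 1 = (List.replicate k (0:Int) ++ rest.reverse).length + 1 := by
        simp; omega
      have hassoc : (List.replicate k (0:Int) ++ (x :: y :: rest).reverse) ++ a
          = (List.replicate k (0:Int) ++ rest.reverse) ++ ([y] ++ ([x] ++ a)) := by
        simp
      rw [hi, if_neg (by omega : ¬ (List.replicate k (0:Int) ++ rest.reverse).length + 1 = 0), hassoc]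
      set c := List.replicate k (0:Int) ++ rest.reverse with hc
      have hv : (c ++ ([y] ++ ([x] ++ a))).getD (c.length + 1) 0 = x := by
        rw [getD_app c ([y] ++ ([x] ++ a)) 1]; rfl
      have hv1 : (c ++ ([y] ++ ([x] ++ a))).getD (c.length + 1 - 1) 0 = y := by
        have h0 := getD_app c ([y] ++ ([x] ++ a)) 0
        simp only [Nat.add_zero] at h0
        simpa using h0
      rw [hv, hv1, if_neg (by omega : ¬ x = (0:Int))]
      by_cases hxy : x = y
      · rw [if_pos hxy]
        have hset : (c ++ ([y] ++ ([x] ++ a))).set (c.length + 1) (x * 2)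
            = c ++ ([y] ++ ([x * 2] ++ a)) := by
          rw [List.set_append_right _ _ (by omega)]
          simp
        rw [hset]
        have htake : List.take (c.length + 1 - 1) (c ++ ([y] ++ ([x * 2] ++ a))) = c := by
          simp
        have hdrop : List.drop (c.length + 1) (c ++ ([y] ++ ([x * 2] ++ a))) = [x * 2] ++ a := by
          rw [List.drop_append]
          simp [List.drop_of_length_le]
        simp only [htake, hdrop]
        have hshape : (0 : Int) :: c ++ ([x * 2] ++ a)
            = (List.replicate (k + 1) (0:Int) ++ rest.reverse) ++ ((x * 2) :: a) := by
          simp [hc, List.replicate_succ]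
        have hidx : c.length + 1 - 1 = (k + 1) + rest.length - 1 := by
          simp [hc]
        rw [hshape, hidx, ih rest ((x * 2) :: a) (k + 1) (by simp at hm; omega)
          (fun z hz => hpos z (by simp [hz]))]
        have hml := mergeL_length_le rest
        have hzr : (k + 1) + (rest.length - (mergeL rest).length)
            = k + ((x :: y :: rest).length - (mergeL (x :: y :: rest)).length) := by
          simp only [mergeL, if_pos hxy, List.length_cons]
          omega
        rw [← hzr]
        simp [mergeL, hxy]
      · rw [if_neg hxy]
        have hshape : c ++ ([y] ++ ([x] ++ a))
            = (List.replicate k (0:Int) ++ (y :: rest).reverse) ++ (x :: a) := by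
          simp [hc]
        have hidx : c.length + 1 - 1 = k + (y :: rest).length - 1 := by
          simp [hc]
        rw [hshape, hidx, ih (y :: rest) (x :: a) k (by simp at hm ⊢; omega)
          (fun z hz => hpos z (by simp at hz ⊢; tauto))]
        have hml := mergeL_length_le (y :: rest)
        have hzr : k + ((y :: rest).length - (mergeL (y :: rest)).length)
            = k + ((x :: y :: rest).length - (mergeL (x :: y :: rest)).length) := by
          simp only [mergeL, if_neg hxy, List.length_cons]
          simp only [List.length_cons] at hml
          omega
        rw [hzr]
        simp [mergeL, hxy]

-- ===== VERDICT (by name: the statement is the Claim_ definition above) =====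
theorem move_line_spec : Claim_equal_move_line := by
  intro line direction _
  unfold Spec_move_line move_line move_line_alt
  have hflen : (line.filter (fun x => 0 < x)).length ≤ line.length := List.length_filter_le _ _
  have hfpos : ∀ x ∈ line.filter (fun x => 0 < x), (0:Int) < x := by
    intro x hx
    have := List.of_mem_filter hx
    exact of_decide_eq_true this
  by_cases hd : direction = 1
  · simp only [if_pos hd]
    rw [mergeLoop_eq]
    set nums := line.filter (fun x => 0 < x) with hnums
    have hml := mergeL_length_le nums.reverse
    have h1 : (List.replicate (line.length - nums.length) (0:Int) ++ nums).length - 1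
        = (line.length - nums.length) + nums.reverse.length - 1 := by
      simp only [List.length_append, List.length_replicate, List.length_reverse]
    have h2 : List.replicate (line.length - nums.length) (0:Int) ++ nums
        = (List.replicate (line.length - nums.length) (0:Int) ++ nums.reverse.reverse) ++ [] := by
      simp
    rw [h1, h2, rightLoop_inv nums.reverse.length nums.reverse [] (line.length - nums.length) le_rfl
      (by intro x hx; exact hfpos x (List.mem_reverse.mp hx))]
    simp only [List.drop_zero, List.nil_append, List.append_nil, List.reverse_append,
      List.reverse_replicate]
    have h3 : (line.length - nums.length) + (nums.reverse.length - (mergeL nums.reverse).length)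
        = line.length - (mergeL nums.reverse).length := by
      simp only [List.length_reverse] at *; omega
    rw [h3]
  · simp only [if_neg hd]
    rw [mergeLoop_eq]
    set nums := line.filter (fun x => 0 < x) with hnums
    have hml := mergeL_length_le nums
    have h1 : (nums ++ List.replicate (line.length - nums.length) (0:Int)).length - 1
        = (List.nil (α := Int)).length + nums.length + (line.length - nums.length) - 1 := by
      simp
    rw [h1]
    have h2 : nums ++ List.replicate (line.length - nums.length) (0:Int)
        = [] ++ (nums ++ List.replicate (line.length - nums.length) (0:Int)) := by simp
    rw [h2]
    have := leftLoop_inv nums.length nums [] (line.length - nums.length) le_rfl hfpos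
    simp only [List.length_nil, List.nil_append] at this ⊢
    rw [this]
    have h3 : (line.length - nums.length) + (nums.length - (mergeL nums).length)
        = line.length - (mergeL nums).length := by omega
    rw [h3]
    simp
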